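-- pv_equiv track=rewrite | github.com/dhk-12/Voice-Controlled-Smart-Home-Automation-System | Backend/app.py.py | match_all_from_dict
-- ===== SOURCE A (Python) =====
-- def match_all_from_dict(text: str, keyword_dict: dict) -> list[str]:
--     matches = []
--     for key, variations in keyword_dict.items():
--         for v in variations:
--             if v in text:
--                 matches.append(key)
--                 break  # Avoid duplicates if multiple synonyms match
--     return matches
-- ===== SOURCE B (Python) =====
-- # B indexes all windows of the text of the relevant lengths once, then answers each
-- # variation by a set lookup (one pass per distinct length instead of one scan per variation).
-- def match_all_from_dict(text: str, keyword_dict: dict) -> list[str]: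
--     lengths = {len(v) for variations in keyword_dict.values() for v in variations}
--     found = {text[i:i+L] for L in lengths for i in range(len(text) - L + 1)}
--     return [key for key, variations in keyword_dict.items()
--             if any(v in found for v in variations)]
-- ===== Notes on version B (the rewrite author's own statement) =====
-- stated objective: faster
-- what changed: Instead of scanning the text once per variation of every key, B builds one substring index (the set of all windows of the text whose lengths occur among the variations) in a single pass per distinct length and answers each variation by a set lookup.
import Mathlib
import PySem

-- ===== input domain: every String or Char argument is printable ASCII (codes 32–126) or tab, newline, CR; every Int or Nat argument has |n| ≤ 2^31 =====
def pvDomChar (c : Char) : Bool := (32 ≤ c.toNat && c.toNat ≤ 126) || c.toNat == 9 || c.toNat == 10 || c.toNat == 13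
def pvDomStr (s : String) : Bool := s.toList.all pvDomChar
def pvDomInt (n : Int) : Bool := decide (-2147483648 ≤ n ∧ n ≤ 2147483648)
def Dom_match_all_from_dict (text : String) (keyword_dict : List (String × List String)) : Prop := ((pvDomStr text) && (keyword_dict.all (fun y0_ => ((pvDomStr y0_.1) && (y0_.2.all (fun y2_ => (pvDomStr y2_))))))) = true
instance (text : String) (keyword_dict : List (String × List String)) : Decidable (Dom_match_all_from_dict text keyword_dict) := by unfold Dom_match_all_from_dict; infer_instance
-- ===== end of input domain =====

-- B replaces A's per-key substring scans by one substring index (the set of all windows of text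
-- whose lengths occur among the variations), answering each variation by a set lookup
-- (objective: faster — one indexing pass per distinct length replaces a text scan per variation).

-- ===== PORT A =====
-- inner loop: 'for v in variations: if v in text: matches.append(key); break'
def matchVarLoop (text key : String) (acc : List String) : List String → List String
  | [] => acc
  | v :: rest =>
    if PySem.Str.isIn v text then acc ++ [key]
    else matchVarLoop text key acc rest

def match_all_from_dict (text : String) (keyword_dict : List (String × List String)) : List String :=
  keyword_dict.foldl (fun acc p => matchVarLoop text p.1 acc p.2) []

-- ===== PORT B =====
def match_all_from_dict_alt (text : String) (keyword_dict : List (String × List String)) : List String :=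
  let lengths : PySem.Set Int :=
    PySem.Set.ofList ((keyword_dict.flatMap (fun p => p.2)).map (fun v => PySem.Str.len v))
  let found : PySem.Set String :=
    PySem.Set.ofList (lengths.flatMap (fun L =>
      (PySem.List.pyRange 0 (PySem.Str.len text - L + 1) 1).map (fun i =>
        PySem.Str.slice text (some i) (some (i + L)))))
  (keyword_dict.filter (fun p => p.2.any (fun v => PySem.Set.contains found v))).map (fun p => p.1)

-- ===== PRECONDITION & SPEC =====
def Spec_match_all_from_dict (text : String) (keyword_dict : List (String × List String)) (out : List String) : Prop := out = match_all_from_dict_alt text keyword_dict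
instance (text : String) (keyword_dict : List (String × List String)) (out : List String) : Decidable (Spec_match_all_from_dict text keyword_dict out) := by unfold Spec_match_all_from_dict; infer_instance

-- ===== CLAIM (what is proved, stated in full; the proofs are below) =====
def Claim_equal_match_all_from_dict : Prop := ∀ (text : String) (keyword_dict : List (String × List String)), Dom_match_all_from_dict text keyword_dict → Spec_match_all_from_dict text keyword_dict (match_all_from_dict text keyword_dict)

-- ===== LEMMAS AND PROOFS =====

-- the window list B indexes, as a plain list
def pvWindows (text : String) (lens : List Int) : List String :=
  lens.flatMap (fun L =>
    (PySem.List.pyRange 0 (PySem.Str.len text - L + 1) 1).map (fun i =>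
      PySem.Str.slice text (some i) (some (i + L))))

-- every window is a substring of text
lemma isIn_of_mem_windows (text : String) (lens : List Int) (v : String)
    (hnn : ∀ L ∈ lens, 0 ≤ L)
    (hv : v ∈ pvWindows text lens) : PySem.Str.isIn v text = true := by
  simp only [pvWindows, List.mem_flatMap, List.mem_map] at hv
  obtain ⟨L, hL, i, hi, hslice⟩ := hv
  rw [PySem.List.mem_pyRange_one] at hi
  have h0i : 0 ≤ i := hi.1
  have h0L : 0 ≤ L := hnn L hL
  have hvl : v.toList = (text.toList.drop i.toNat).take ((i + L).toNat - i.toNat) := by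
    rw [← hslice]
    simp only [PySem.Str.toList_slice, PySem.Chars.slice_eq_listSlice]
    rw [PySem.List.slice_toNat text.toList h0i (by omega)]
  rw [PySem.Str.isIn_eq, PySem.Chars.isIn_iff_infix, hvl]
  exact ((List.take_prefix _ _).isInfix).trans (List.drop_suffix _ _).isInfix

-- a substring whose length is indexed is a window
lemma mem_windows_of_isIn (text : String) (lens : List Int) (v : String)
    (hlen : (v.toList.length : Int) ∈ lens)
    (hv : PySem.Str.isIn v text = true) : v ∈ pvWindows text lens := by
  rw [PySem.Str.isIn_eq, PySem.Chars.isIn_iff_infix] at hv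
  obtain ⟨s, t, hst⟩ := hv
  have hlensum : s.length + v.length + t.length = text.length := by
    have := congrArg List.length hst; simp at this; omega
  simp only [pvWindows, List.mem_flatMap, List.mem_map]
  refine ⟨(v.toList.length : Int), hlen, (s.length : Int), ?_, ?_⟩
  · rw [PySem.List.mem_pyRange_one]
    refine ⟨Int.natCast_nonneg _, ?_⟩
    simp only [PySem.Str.len_eq]
    simp only [String.length_toList]
    omega
  · apply String.toList_inj.mp
    simp only [PySem.Str.toList_slice, PySem.Chars.slice_eq_listSlice]
    rw [PySem.List.slice_natCast_add, ← hst, List.append_assoc]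
    simp

-- B's found set: membership equals the substring test,
-- for every variation occurring in keyword_dict
lemma contains_found_eq_isIn (text : String) (keyword_dict : List (String × List String))
    (v : String) (hv : ∃ p ∈ keyword_dict, v ∈ p.2) :
    PySem.Set.contains
      (PySem.Set.ofList (pvWindows text
        (PySem.Set.ofList ((keyword_dict.flatMap (fun p => p.2)).map (fun w => PySem.Str.len w)))))
      v = PySem.Str.isIn v text := by
  set lens := PySem.Set.ofList ((keyword_dict.flatMap (fun p => p.2)).map (fun w => PySem.Str.len w)) with hlens
  rw [Bool.eq_iff_iff]
  rw [PySem.Set.contains_iff _ v, PySem.Set.mem_ofList]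
  constructor
  · intro h
    refine isIn_of_mem_windows text lens v ?_ h
    intro L hL
    rw [hlens, PySem.Set.mem_ofList, List.mem_map] at hL
    obtain ⟨w, _, hw⟩ := hL
    rw [← hw, PySem.Str.len_eq]
    exact Int.natCast_nonneg _
  · intro h
    refine mem_windows_of_isIn text lens v ?_ h
    rw [hlens, PySem.Set.mem_ofList, List.mem_map]
    obtain ⟨p, hp, hvp⟩ := hv
    exact ⟨v, List.mem_flatMap.mpr ⟨p, hp, hvp⟩, PySem.Str.len_eq v⟩

-- A's inner loop appends the key iff some variation is a substring
lemma matchVarLoop_eq (text key : String) (acc : List String) (vs : List String) :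
    matchVarLoop text key acc vs =
      if vs.any (fun v => PySem.Str.isIn v text) then acc ++ [key] else acc := by
  induction vs with
  | nil => simp [matchVarLoop]
  | cons v rest ih =>
    simp only [matchVarLoop, List.any_cons]
    by_cases h : PySem.Str.isIn v text = true
    · rw [if_pos h]
      rw [PySem.Str.isIn_eq] at h
      simp [h]
    · rw [if_neg h, ih]
      simp only [Bool.not_eq_true] at h
      rw [PySem.Str.isIn_eq] at h
      simp [h]

-- A's outer fold is filter-then-project
lemma foldA_eq (text : String) (kd : List (String × List String)) (acc : List String) :
    kd.foldl (fun acc p => matchVarLoop text p.1 acc p.2) acc =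
      acc ++ (kd.filter (fun p => p.2.any (fun v => PySem.Str.isIn v text))).map (fun p => p.1) := by
  induction kd generalizing acc with
  | nil => simp
  | cons p rest ih =>
    rw [List.foldl_cons, ih, matchVarLoop_eq, List.filter_cons]
    by_cases h : (p.2.any fun v => PySem.Str.isIn v text) = true
    · rw [if_pos h, if_pos h]; simp
    · rw [if_neg h, if_neg h]

-- ===== VERDICT (by name: the statement is the Claim_ definition above) =====
theorem match_all_from_dict_spec : Claim_equal_match_all_from_dict := by
  intro text kd _
  show match_all_from_dict text kd = match_all_from_dict_alt text kd
  have h2 : match_all_from_dict_alt text kd =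
      (kd.filter (fun p => p.2.any (fun v => PySem.Set.contains
        (PySem.Set.ofList (pvWindows text
          (PySem.Set.ofList ((kd.flatMap (fun p => p.2)).map (fun w => PySem.Str.len w))))) v))).map
        (fun p => p.1) := rfl
  rw [match_all_from_dict, foldA_eq, List.nil_append, h2]
  have : ∀ p ∈ kd,
      (p.2.any (fun v => PySem.Set.contains
        (PySem.Set.ofList (pvWindows text
          (PySem.Set.ofList ((kd.flatMap (fun p => p.2)).map (fun w => PySem.Str.len w))))) v)) =
      (p.2.any (fun v => PySem.Str.isIn v text)) := by
    intro p hp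
    rw [Bool.eq_iff_iff, List.any_eq_true, List.any_eq_true]
    constructor <;> rintro ⟨v, hv, h⟩ <;> refine ⟨v, hv, ?_⟩ <;>
      rw [contains_found_eq_isIn text kd v ⟨p, hp, hv⟩] at * <;> exact h
  rw [List.filter_congr this]
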